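-- pv_equiv track=rewrite | github.com/ganshabangwohaiqihao-a11y/DiffSynth-Studio | scripts_custom/prompt_decomposition_pipeline_llm_mixed.py | resolve_mapping_for_metadata
-- ===== SOURCE A (Python) =====
-- from typing import Dict, List, Tuple
--
-- def resolve_mapping_for_metadata(
--     metadata: List[Dict],
--     csv_map: Dict[str, str],
--     xlsx_map: Dict[str, str],
--     order: str = "csv_first",
-- ) -> Tuple[Dict[str, str], Dict[str, int]]:
--     """Resolve plan_id -> prompt for metadata by ordered fallback lookup.
--
--     order:
--       - csv_first: csv -> xlsx
--       - xlsx_first: xlsx -> csv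
--     """
--     if order not in {"csv_first", "xlsx_first"}:
--         raise ValueError("order must be one of: csv_first, xlsx_first")
--
--     primary_name = "csv" if order == "csv_first" else "xlsx"
--     primary_map = csv_map if order == "csv_first" else xlsx_map
--     secondary_name = "xlsx" if order == "csv_first" else "csv"
--     secondary_map = xlsx_map if order == "csv_first" else csv_map
--
--     resolved: Dict[str, str] = {}
--     source_used: Dict[str, str] = {}
--
--     meta_plan_ids = {str(x.get("plan_id")) for x in metadata if x.get("plan_id") is not None}
--     for pid in meta_plan_ids:
--         p = primary_map.get(pid, "")
--         if p:
--             resolved[pid] = p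
--             source_used[pid] = primary_name
--             continue
--
--         s = secondary_map.get(pid, "")
--         if s:
--             resolved[pid] = s
--             source_used[pid] = secondary_name
--
--     stats = {
--         "meta_plan_ids": len(meta_plan_ids),
--         "covered": len(resolved),
--         "from_csv": sum(1 for v in source_used.values() if v == "csv"),
--         "from_xlsx": sum(1 for v in source_used.values() if v == "xlsx"),
--         "missing": len(meta_plan_ids) - len(resolved),
--     }
--     return resolved, stats
-- ===== SOURCE B (Python) =====
-- def resolve_mapping_for_metadata(metadata, csv_map, xlsx_map, order="csv_first"):
--     """Pre-merge the two maps into one source-tagged union dict (lower-priority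
--     layer written first, higher-priority overwrites), then resolve each deduped
--     plan_id with a single lookup; stats come from a counter dict."""
--     if order == "csv_first":
--         layers = [("xlsx", xlsx_map), ("csv", csv_map)]
--     elif order == "xlsx_first":
--         layers = [("csv", csv_map), ("xlsx", xlsx_map)]
--     else:
--         raise ValueError("order must be one of: csv_first, xlsx_first")
--
--     merged = {}
--     for name, mapping in layers:
--         for k, v in mapping.items():
--             if v:
--                 merged[k] = (v, name)
--
--     ids = {str(x.get("plan_id")) for x in metadata if x.get("plan_id") is not None}
--     resolved = {}
--     counts = {"csv": 0, "xlsx": 0}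
--     for pid in ids:
--         hit = merged.get(pid)
--         if hit is not None:
--             resolved[pid] = hit[0]
--             counts[hit[1]] += 1
--
--     covered = counts["csv"] + counts["xlsx"]
--     return resolved, {
--         "meta_plan_ids": len(ids),
--         "covered": covered,
--         "from_csv": counts["csv"],
--         "from_xlsx": counts["xlsx"],
--         "missing": len(ids) - covered,
--     }
-- ===== Notes on version B (the rewrite author's own statement) =====
-- stated objective: alternative
-- what changed: B pre-merges the two maps into one source-tagged union dict (lower-priority layer written first, higher-priority overwriting), so each deduped plan_id is resolved by a single lookup with no ordered-fallback branching, and the stats come from a counter dict instead of a source_used table scanned twice; Pre_ additionally requires unique keys in the two association lists, which every real Python dict argument satisfies.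
import Mathlib
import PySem

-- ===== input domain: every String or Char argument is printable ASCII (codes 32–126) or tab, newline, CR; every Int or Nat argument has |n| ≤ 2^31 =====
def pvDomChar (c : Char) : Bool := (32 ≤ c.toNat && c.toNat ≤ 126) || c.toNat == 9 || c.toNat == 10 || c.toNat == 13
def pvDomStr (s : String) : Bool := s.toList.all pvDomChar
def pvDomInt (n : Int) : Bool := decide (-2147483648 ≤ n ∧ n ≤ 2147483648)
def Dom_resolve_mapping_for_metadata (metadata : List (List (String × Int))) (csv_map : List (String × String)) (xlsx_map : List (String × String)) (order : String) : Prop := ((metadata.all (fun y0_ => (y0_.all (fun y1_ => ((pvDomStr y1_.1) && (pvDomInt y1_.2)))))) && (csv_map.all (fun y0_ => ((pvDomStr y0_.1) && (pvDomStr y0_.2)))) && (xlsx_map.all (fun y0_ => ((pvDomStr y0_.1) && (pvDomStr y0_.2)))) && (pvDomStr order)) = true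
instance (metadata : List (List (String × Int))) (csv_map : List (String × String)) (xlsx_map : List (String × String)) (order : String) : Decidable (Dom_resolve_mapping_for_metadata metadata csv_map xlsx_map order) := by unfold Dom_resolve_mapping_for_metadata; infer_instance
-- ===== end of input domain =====

-- B pre-merges the two maps into one source-tagged union dict and resolves each deduped
-- plan_id with a single lookup, counting sources in a counter dict (objective: alternative).

-- ===== PORT A =====
-- m.get(pid, "") on an association list (dict lookup = first match)
def pvLook (m : List (String × String)) (pid : String) : String :=
  (List.lookup pid m).getD ""

-- the 'for pid in meta_plan_ids' loop of A, carrying (resolved, source_used)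
def pvAloop (L : List String) (primary_map secondary_map : List (String × String))
    (primary_name secondary_name : String) :
    PySem.Dict String String × PySem.Dict String String :=
  L.foldl (fun st pid =>
    let p := pvLook primary_map pid
    if p ≠ "" then (st.1.insert pid p, st.2.insert pid primary_name)
    else
      let s := pvLook secondary_map pid
      if s ≠ "" then (st.1.insert pid s, st.2.insert pid secondary_name)
      else st)
    (PySem.Dict.empty, PySem.Dict.empty)

def resolve_mapping_for_metadata (metadata : List (List (String × Int))) (csv_map : List (String × String)) (xlsx_map : List (String × String)) (order : String) : (List (String × String)) × (List (String × Int)) :=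
  if order = "csv_first" ∨ order = "xlsx_first" then
    let primary_name := if order = "csv_first" then "csv" else "xlsx"
    let primary_map := if order = "csv_first" then csv_map else xlsx_map
    let secondary_name := if order = "csv_first" then "xlsx" else "csv"
    let secondary_map := if order = "csv_first" then xlsx_map else csv_map
    let meta_plan_ids : PySem.Set String :=
      PySem.Set.ofList (metadata.filterMap (fun x => (List.lookup "plan_id" x).map PySem.Int.toStr))
    let st := pvAloop meta_plan_ids primary_map secondary_map primary_name secondary_name
    let resolved := st.1
    let source_used := st.2
    (resolved.items,
      [("meta_plan_ids", (meta_plan_ids.length : Int)),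
       ("covered", (resolved.size : Int)),
       ("from_csv", ((source_used.values.filter (fun v => v == "csv")).map (fun _ => (1 : Int))).sum),
       ("from_xlsx", ((source_used.values.filter (fun v => v == "xlsx")).map (fun _ => (1 : Int))).sum),
       ("missing", (meta_plan_ids.length : Int) - (resolved.size : Int))])
  else ([], [])  -- Python raises ValueError here; excluded by Pre_

-- ===== PORT B =====
-- 'for k, v in mapping.items(): if v: merged[k] = (v, name)' for one layer (name, mapping)
def pvMergeLayer (m : PySem.Dict String (String × String))
    (layer : String × List (String × String)) : PySem.Dict String (String × String) :=
  layer.2.foldl (fun m kv => if kv.2 ≠ "" then m.insert kv.1 (kv.2, layer.1) else m) m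

-- body of B's resolution loop over the deduped ids: one lookup in the union map
def pvBstep (merged : PySem.Dict String (String × String))
    (st : PySem.Dict String String × PySem.Dict String Int) (pid : String) :
    PySem.Dict String String × PySem.Dict String Int :=
  match merged.get? pid with
  | none => st
  | some hit => (st.1.insert pid hit.1, st.2.modify hit.2 0 (· + 1))

def resolve_mapping_for_metadata_alt (metadata : List (List (String × Int))) (csv_map : List (String × String)) (xlsx_map : List (String × String)) (order : String) : (List (String × String)) × (List (String × Int)) :=
  if order = "csv_first" ∨ order = "xlsx_first" then
    let layers := if order = "csv_first" then [("xlsx", xlsx_map), ("csv", csv_map)]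
                  else [("csv", csv_map), ("xlsx", xlsx_map)]
    let merged := layers.foldl pvMergeLayer PySem.Dict.empty
    let ids : PySem.Set String :=
      PySem.Set.ofList (metadata.filterMap (fun x => (List.lookup "plan_id" x).map PySem.Int.toStr))
    let st := ids.foldl (pvBstep merged)
      (PySem.Dict.empty, PySem.Dict.ofList [("csv", (0 : Int)), ("xlsx", 0)])
    let covered := st.2.getD "csv" 0 + st.2.getD "xlsx" 0
    (st.1.items,
      [("meta_plan_ids", (ids.length : Int)),
       ("covered", covered),
       ("from_csv", st.2.getD "csv" 0),
       ("from_xlsx", st.2.getD "xlsx" 0),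
       ("missing", (ids.length : Int) - covered)])
  else ([], [])  -- Python raises ValueError here; excluded by Pre_

-- ===== PRECONDITION & SPEC =====
-- A raises ValueError for any other order string.  Pre_ also requires unique keys in the two
-- association lists: a duplicate-keyed list does not correspond to any Python dict argument
-- (a Python dict cannot hold duplicate keys), and only on such lists do the two ports'
-- first-match vs. overwrite readings of the list diverge.
def Pre_resolve_mapping_for_metadata (metadata : List (List (String × Int))) (csv_map : List (String × String)) (xlsx_map : List (String × String)) (order : String) : Prop :=
  (order = "csv_first" ∨ order = "xlsx_first")
    ∧ (csv_map.map Prod.fst).Nodup ∧ (xlsx_map.map Prod.fst).Nodup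
instance (metadata : List (List (String × Int))) (csv_map : List (String × String)) (xlsx_map : List (String × String)) (order : String) : Decidable (Pre_resolve_mapping_for_metadata metadata csv_map xlsx_map order) := by unfold Pre_resolve_mapping_for_metadata; infer_instance

def pvWitness_resolve_mapping_for_metadata : (List (List (String × Int))) × (List (String × String)) × (List (String × String)) × String :=
  ([[("plan_id", 1)], [("plan_id", 2)]], [("1", "a prompt")], [("2", "b prompt")], "csv_first")

def Spec_resolve_mapping_for_metadata (metadata : List (List (String × Int))) (csv_map : List (String × String)) (xlsx_map : List (String × String)) (order : String) (out : (List (String × String)) × (List (String × Int))) : Prop := out = resolve_mapping_for_metadata_alt metadata csv_map xlsx_map order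
instance (metadata : List (List (String × Int))) (csv_map : List (String × String)) (xlsx_map : List (String × String)) (order : String) (out : (List (String × String)) × (List (String × Int))) : Decidable (Spec_resolve_mapping_for_metadata metadata csv_map xlsx_map order out) := by unfold Spec_resolve_mapping_for_metadata; infer_instance

-- ===== CLAIM (what is proved, stated in full; the proofs are below) =====
def Claim_equal_resolve_mapping_for_metadata : Prop := ∀ (metadata : List (List (String × Int))) (csv_map : List (String × String)) (xlsx_map : List (String × String)) (order : String), Dom_resolve_mapping_for_metadata metadata csv_map xlsx_map order → Pre_resolve_mapping_for_metadata metadata csv_map xlsx_map order → Spec_resolve_mapping_for_metadata metadata csv_map xlsx_map order (resolve_mapping_for_metadata metadata csv_map xlsx_map order)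

-- ===== LEMMAS AND PROOFS =====

-- A's two-stage fallback, as an option-valued resolver (proof-side view)
def pvResolveOne (lookups : List ((List (String × String)) × String)) (pid : String) :
    Option (String × String) :=
  match lookups with
  | [] => none
  | (m, name) :: rest =>
    let prompt := pvLook m pid
    if prompt ≠ "" then some (prompt, name) else pvResolveOne rest pid

-- A's loop step, written through the resolver
def pvStepAB (rv : String → Option (String × String))
    (st : PySem.Dict String String × PySem.Dict String String) (pid : String) :
    PySem.Dict String String × PySem.Dict String String :=
  match rv pid with
  | none => st
  | some (p, nm) => (st.1.insert pid p, st.2.insert pid nm)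

-- B's loop step, written through the resolver
def pvStepR (rv : String → Option (String × String))
    (st : PySem.Dict String String × PySem.Dict String Int) (pid : String) :
    PySem.Dict String String × PySem.Dict String Int :=
  match rv pid with
  | none => st
  | some q => (st.1.insert pid q.1, st.2.modify q.2 0 (· + 1))

def pvIds (metadata : List (List (String × Int))) : List String :=
  metadata.filterMap (fun x => (List.lookup "plan_id" x).map PySem.Int.toStr)

def pvHitName (rv : String → Option (String × String)) (name pid : String) : Bool :=
  match rv pid with
  | some q => q.2 == name
  | none => false

def pvMergedOf (m1 m2 : List (String × String)) (n1 n2 : String) :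
    PySem.Dict String (String × String) :=
  [(n2, m2), (n1, m1)].foldl pvMergeLayer PySem.Dict.empty

def pvC0 : PySem.Dict String Int := PySem.Dict.ofList [("csv", (0 : Int)), ("xlsx", 0)]

lemma pvLookup_none (a : String) :
    ∀ l : List (String × String), a ∉ l.map Prod.fst → List.lookup a l = none := by
  intro l
  induction l with
  | nil => intro _; rfl
  | cons kv t ih =>
    intro h
    simp only [List.map_cons, List.mem_cons, not_or] at h
    have hne : (a == kv.1) = false := beq_eq_false_iff_ne.mpr h.1
    simp [List.lookup, hne, ih h.2]

lemma pvMergeLayer_get? (name : String) :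
    ∀ (l : List (String × String)) (m : PySem.Dict String (String × String)) (k : String),
    (l.map Prod.fst).Nodup →
    (pvMergeLayer m (name, l)).get? k
      = if pvLook l k = "" then m.get? k else some (pvLook l k, name) := by
  intro l
  induction l with
  | nil => intro m k _; simp [pvMergeLayer, pvLook]
  | cons kv t ih =>
    intro m k hnd
    obtain ⟨a, v⟩ := kv
    simp only [List.map_cons, List.nodup_cons] at hnd
    have hstep : pvMergeLayer m (name, (a, v) :: t)
        = pvMergeLayer (if v ≠ "" then m.insert a (v, name) else m) (name, t) := by
      simp [pvMergeLayer]
    by_cases hk : k = a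
    · subst hk
      have hta : pvLook t k = "" := by
        simp [pvLook, pvLookup_none k t hnd.1]
      have hlc : pvLook ((k, v) :: t) k = v := by simp [pvLook, List.lookup]
      by_cases hv : v = ""
      · rw [hstep, if_neg (by simp [hv]), ih m k hnd.2, hta, hlc, hv]
      · rw [hstep, if_pos hv, ih _ k hnd.2, hta]
        simp [hlc, hv, PySem.Dict.get?_insert_self]
    · have hlc : pvLook ((a, v) :: t) k = pvLook t k := by
        have : (k == a) = false := beq_eq_false_iff_ne.mpr hk
        simp [pvLook, List.lookup, this]
      by_cases hv : v = ""
      · rw [hstep, if_neg (by simp [hv]), ih m k hnd.2, hlc]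
      · rw [hstep, if_pos hv, ih _ k hnd.2, hlc,
            PySem.Dict.get?_insert_of_ne _ _ hk]

lemma pvMerged_get? (m1 m2 : List (String × String)) (n1 n2 : String)
    (h1 : (m1.map Prod.fst).Nodup) (h2 : (m2.map Prod.fst).Nodup) (k : String) :
    (pvMergedOf m1 m2 n1 n2).get? k = pvResolveOne [(m1, n1), (m2, n2)] k := by
  unfold pvMergedOf
  simp only [List.foldl_cons, List.foldl_nil]
  rw [pvMergeLayer_get? n1 m1 _ k h1, pvMergeLayer_get? n2 m2 _ k h2]
  by_cases ha : pvLook m1 k = ""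
  · by_cases hb : pvLook m2 k = "" <;>
      simp [pvResolveOne, ha, hb, PySem.Dict.get?_empty]
  · simp [pvResolveOne, ha]

lemma pvAloop_eq (L : List String) (m1 m2 : List (String × String)) (n1 n2 : String) :
    pvAloop L m1 m2 n1 n2
      = L.foldl (pvStepAB (pvResolveOne [(m1, n1), (m2, n2)])) (PySem.Dict.empty, PySem.Dict.empty) := by
  unfold pvAloop
  congr 1
  funext st pid
  by_cases h1 : pvLook m1 pid = ""
  · by_cases h2 : pvLook m2 pid = "" <;> simp [pvStepAB, pvResolveOne, h1, h2]
  · simp [pvStepAB, pvResolveOne, h1]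

lemma pvBstep_eq (m1 m2 : List (String × String)) (n1 n2 : String)
    (h1 : (m1.map Prod.fst).Nodup) (h2 : (m2.map Prod.fst).Nodup) :
    pvBstep (pvMergedOf m1 m2 n1 n2) = pvStepR (pvResolveOne [(m1, n1), (m2, n2)]) := by
  funext st pid
  unfold pvBstep pvStepR
  rw [pvMerged_get? m1 m2 n1 n2 h1 h2]

-- A's fold: items of resolved and source_used
lemma pvAB_items (rv : String → Option (String × String)) :
    ∀ (L : List String) (d1 d2 : PySem.Dict String String), L.Nodup →
    (∀ pid ∈ L, d1.contains pid = false) → (∀ pid ∈ L, d2.contains pid = false) →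
    (L.foldl (pvStepAB rv) (d1, d2)).1.items
        = d1.items ++ L.filterMap (fun pid => (rv pid).map fun q => (pid, q.1))
    ∧ (L.foldl (pvStepAB rv) (d1, d2)).2.items
        = d2.items ++ L.filterMap (fun pid => (rv pid).map fun q => (pid, q.2)) := by
  intro L
  induction L with
  | nil => intro d1 d2 _ _ _; simp
  | cons x t ih =>
    intro d1 d2 hnd h1 h2
    simp only [List.nodup_cons] at hnd
    cases hr : rv x with
    | none =>
      have := ih d1 d2 hnd.2 (fun p hp => h1 p (by simp [hp])) (fun p hp => h2 p (by simp [hp]))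
      simp [List.foldl_cons, pvStepAB, hr, this.1, this.2]
    | some q =>
      obtain ⟨p, nm⟩ := q
      have hc1 : d1.contains x = false := h1 x (by simp)
      have hc2 : d2.contains x = false := h2 x (by simp)
      have h1' : ∀ pid ∈ t, (d1.insert x p).contains pid = false := by
        intro pid hp
        rw [PySem.Dict.contains_insert]
        have : pid ≠ x := fun h => hnd.1 (h ▸ hp)
        simp [this, h1 pid (by simp [hp])]
      have h2' : ∀ pid ∈ t, (d2.insert x nm).contains pid = false := by
        intro pid hp
        rw [PySem.Dict.contains_insert]
        have : pid ≠ x := fun h => hnd.1 (h ▸ hp)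
        simp [this, h2 pid (by simp [hp])]
      have := ih (d1.insert x p) (d2.insert x nm) hnd.2 h1' h2'
      simp [List.foldl_cons, pvStepAB, hr, this.1, this.2,
            PySem.Dict.items_insert_of_not_contains _ _ hc1,
            PySem.Dict.items_insert_of_not_contains _ _ hc2]

-- B's fold: items of resolved and the per-source counters
lemma pvBfold (rv : String → Option (String × String)) :
    ∀ (L : List String) (d : PySem.Dict String String) (c : PySem.Dict String Int), L.Nodup →
    (∀ pid ∈ L, d.contains pid = false) →
    (L.foldl (pvStepR rv) (d, c)).1.items
        = d.items ++ L.filterMap (fun pid => (rv pid).map fun q => (pid, q.1))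
    ∧ ∀ name, (L.foldl (pvStepR rv) (d, c)).2.getD name 0
        = c.getD name 0 + (L.countP (pvHitName rv name) : Int) := by
  intro L
  induction L with
  | nil => intro d c _ _; simp
  | cons x t ih =>
    intro d c hnd hd
    simp only [List.nodup_cons] at hnd
    cases hr : rv x with
    | none =>
      have := ih d c hnd.2 (fun p hp => hd p (by simp [hp]))
      refine ⟨?_, fun name => ?_⟩
      · simp [List.foldl_cons, pvStepR, hr, this.1]
      · simp [List.foldl_cons, pvStepR, hr, this.2 name, pvHitName,
              List.countP_cons]
    | some q =>
      obtain ⟨p, nm⟩ := q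
      have hc : d.contains x = false := hd x (by simp)
      have hd' : ∀ pid ∈ t, (d.insert x p).contains pid = false := by
        intro pid hp
        rw [PySem.Dict.contains_insert]
        have : pid ≠ x := fun h => hnd.1 (h ▸ hp)
        simp [this, hd pid (by simp [hp])]
      have := ih (d.insert x p) (c.modify nm 0 (· + 1)) hnd.2 hd'
      refine ⟨?_, fun name => ?_⟩
      · simp [List.foldl_cons, pvStepR, hr, this.1,
              PySem.Dict.items_insert_of_not_contains _ _ hc]
      · have h2 := this.2 name
        simp only [List.foldl_cons, pvStepR, hr] at h2 ⊢
        rw [h2, PySem.Dict.getD_modify]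
        by_cases hn : name = nm
        · subst hn
          simp [List.countP_cons, pvHitName, hr]
          push_cast; ring
        · have : (nm == name) = false := beq_eq_false_iff_ne.mpr (fun h => hn h.symm)
          simp [List.countP_cons, pvHitName, hr, this, hn]

lemma pvResolveOne_names (m1 m2 : List (String × String)) (n1 n2 pid p nm : String)
    (h : pvResolveOne [(m1, n1), (m2, n2)] pid = some (p, nm)) : nm = n1 ∨ nm = n2 := by
  simp only [pvResolveOne] at h
  split_ifs at h <;> simp_all

-- length of the resolved list = csv hits + xlsx hits
lemma pv_cov (m1 m2 : List (String × String)) (n1 n2 : String)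
    (hn : n1 = "csv" ∧ n2 = "xlsx" ∨ n1 = "xlsx" ∧ n2 = "csv") (L : List String) :
    (L.filterMap (fun pid => (pvResolveOne [(m1, n1), (m2, n2)] pid).map fun q => (pid, q.1))).length
      = L.countP (pvHitName (pvResolveOne [(m1, n1), (m2, n2)]) "csv")
        + L.countP (pvHitName (pvResolveOne [(m1, n1), (m2, n2)]) "xlsx") := by
  induction L with
  | nil => simp
  | cons a t ih =>
    cases hr : pvResolveOne [(m1, n1), (m2, n2)] a with
    | none => simp [pvHitName, hr, List.countP_cons, ih]
    | some q =>
      obtain ⟨p, nm⟩ := q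
      have hnm := pvResolveOne_names m1 m2 n1 n2 a p nm hr
      have : nm = "csv" ∨ nm = "xlsx" := by
        rcases hn with ⟨e1, e2⟩ | ⟨e1, e2⟩ <;> subst e1 <;> subst e2 <;> tauto
      rcases this with h | h <;> subst h <;>
        simp [pvHitName, hr, List.countP_cons, ih] <;> omega

lemma pv_sum_ones (l : List String) (name : String) :
    ((l.filter (fun v => v == name)).map (fun _ => (1 : Int))).sum
      = (l.countP (fun v => v == name) : Int) := by
  rw [PySem.List.sum_map_const_int]
  simp [List.countP_eq_length_filter]

lemma pv_countName (rv : String → Option (String × String)) (L : List String) (name : String) :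
    ((L.filterMap (fun pid => (rv pid).map fun q => (pid, q.2))).map
        (fun x => x.2)).countP (fun v => v == name)
      = L.countP (pvHitName rv name) := by
  rw [List.map_filterMap, List.countP_filterMap]
  apply List.countP_congr
  intro x _
  cases hr : rv x with
  | none => simp [pvHitName, hr]
  | some q => simp [pvHitName, hr]

lemma pv_main (metadata : List (List (String × Int))) (m1 m2 : List (String × String))
    (n1 n2 : String)
    (hn : n1 = "csv" ∧ n2 = "xlsx" ∨ n1 = "xlsx" ∧ n2 = "csv")
    (h1 : (m1.map Prod.fst).Nodup) (h2 : (m2.map Prod.fst).Nodup) :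
    ((pvAloop (PySem.Set.ofList (pvIds metadata)) m1 m2 n1 n2).1.items,
      ([("meta_plan_ids", ((PySem.Set.ofList (pvIds metadata)).length : Int)),
        ("covered", ((pvAloop (PySem.Set.ofList (pvIds metadata)) m1 m2 n1 n2).1.size : Int)),
        ("from_csv", (((pvAloop (PySem.Set.ofList (pvIds metadata)) m1 m2 n1 n2).2.values.filter
            (fun v => v == "csv")).map (fun _ => (1 : Int))).sum),
        ("from_xlsx", (((pvAloop (PySem.Set.ofList (pvIds metadata)) m1 m2 n1 n2).2.values.filter
            (fun v => v == "xlsx")).map (fun _ => (1 : Int))).sum),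
        ("missing", ((PySem.Set.ofList (pvIds metadata)).length : Int)
            - ((pvAloop (PySem.Set.ofList (pvIds metadata)) m1 m2 n1 n2).1.size : Int))] : List (String × Int)))
    = (((PySem.Set.ofList (pvIds metadata)).foldl (pvBstep (pvMergedOf m1 m2 n1 n2))
          (PySem.Dict.empty, pvC0)).1.items,
       [("meta_plan_ids", ((PySem.Set.ofList (pvIds metadata)).length : Int)),
        ("covered", ((PySem.Set.ofList (pvIds metadata)).foldl (pvBstep (pvMergedOf m1 m2 n1 n2))
              (PySem.Dict.empty, pvC0)).2.getD "csv" 0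
            + ((PySem.Set.ofList (pvIds metadata)).foldl (pvBstep (pvMergedOf m1 m2 n1 n2))
              (PySem.Dict.empty, pvC0)).2.getD "xlsx" 0),
        ("from_csv", ((PySem.Set.ofList (pvIds metadata)).foldl (pvBstep (pvMergedOf m1 m2 n1 n2))
              (PySem.Dict.empty, pvC0)).2.getD "csv" 0),
        ("from_xlsx", ((PySem.Set.ofList (pvIds metadata)).foldl (pvBstep (pvMergedOf m1 m2 n1 n2))
              (PySem.Dict.empty, pvC0)).2.getD "xlsx" 0),
        ("missing", ((PySem.Set.ofList (pvIds metadata)).length : Int)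
            - (((PySem.Set.ofList (pvIds metadata)).foldl (pvBstep (pvMergedOf m1 m2 n1 n2))
                (PySem.Dict.empty, pvC0)).2.getD "csv" 0
              + ((PySem.Set.ofList (pvIds metadata)).foldl (pvBstep (pvMergedOf m1 m2 n1 n2))
                (PySem.Dict.empty, pvC0)).2.getD "xlsx" 0))]) := by
  set L := PySem.Set.ofList (pvIds metadata) with hL
  set rv := pvResolveOne [(m1, n1), (m2, n2)] with hrv
  have hLnd : L.Nodup := PySem.Set.nodup_ofList _
  obtain ⟨hA1, hA2⟩ := pvAB_items rv L PySem.Dict.empty PySem.Dict.empty hLnd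
      (fun _ _ => PySem.Dict.contains_empty _) (fun _ _ => PySem.Dict.contains_empty _)
  rw [pvBstep_eq m1 m2 n1 n2 h1 h2]
  obtain ⟨hB1, hB2⟩ := pvBfold rv L PySem.Dict.empty pvC0 hLnd
      (fun _ _ => PySem.Dict.contains_empty _)
  have hc0csv : pvC0.getD "csv" 0 = 0 := rfl
  have hc0x : pvC0.getD "xlsx" 0 = 0 := rfl
  have hcsv := hB2 "csv"
  have hx := hB2 "xlsx"
  rw [hc0csv, zero_add] at hcsv
  rw [hc0x, zero_add] at hx
  rw [pvAloop_eq, ← hrv]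
  simp only [PySem.Dict.size, PySem.Dict.values]
  rw [hA1, hA2, hB1, hcsv, hx]
  simp only [PySem.Dict.empty, List.nil_append]
  have hcov := pv_cov m1 m2 n1 n2 hn L
  rw [← hrv] at hcov
  have hcnt_csv := pv_countName rv L "csv"
  have hcnt_x := pv_countName rv L "xlsx"
  refine Prod.ext rfl ?_
  simp only [Prod.mk.injEq, List.cons.injEq, and_true, true_and]
  refine ⟨?_, ?_, ?_, ?_⟩
  · rw [hcov]; push_cast; ring
  · rw [pv_sum_ones, hcnt_csv]
  · rw [pv_sum_ones, hcnt_x]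
  · rw [hcov]; push_cast; ring

-- ===== VERDICT (by name: the statement is the Claim_ definition above) =====
theorem resolve_mapping_for_metadata_spec : Claim_equal_resolve_mapping_for_metadata := by
  intro metadata csv_map xlsx_map order _ hpre
  obtain ⟨ho, hc, hx⟩ := hpre
  unfold Spec_resolve_mapping_for_metadata
  rcases ho with h | h <;> subst h
  · simpa [resolve_mapping_for_metadata, resolve_mapping_for_metadata_alt, pvIds, pvMergedOf,
        pvC0] using pv_main metadata csv_map xlsx_map "csv" "xlsx" (Or.inl ⟨rfl, rfl⟩) hc hx
  · simpa [resolve_mapping_for_metadata, resolve_mapping_for_metadata_alt, pvIds, pvMergedOf,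
        pvC0] using pv_main metadata xlsx_map csv_map "xlsx" "csv" (Or.inr ⟨rfl, rfl⟩) hx hc
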